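-- pv_equiv track=rewrite | github.com/p-lots/codewars | 7-kyu/find-all-non-consecutive-numbers/python/solution.py | all_non_consecutive
-- ===== SOURCE A (Python) =====
-- def all_non_consecutive(arr):
--     ret = []
--     if len(arr) <= 1:
--         return ret
--     expected = arr[0]
--     for i, actual in enumerate(arr):
--         if expected != actual:
--             ret.append({'i': i, 'n': actual})
--             expected = actual
--         expected += 1
--     return ret
-- ===== SOURCE B (Python) =====
-- def all_non_consecutive(arr):
--     if len(arr) <= 1:
--         return []
--
--     def solve(lo, hi):
--         # break entries whose index lies strictly between lo and hi
--         if hi - lo <= 1: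
--             return []
--         mid = (lo + hi) // 2
--         junction = [{'i': mid, 'n': arr[mid]}] if arr[mid] != arr[mid - 1] + 1 else []
--         return solve(lo, mid) + junction + solve(mid, hi)
--
--     return solve(0, len(arr))
-- ===== Notes on version B (the rewrite author's own statement) =====
-- stated objective: alternative
-- what changed: B replaces A's single left-to-right pass with a running `expected` accumulator by a divide-and-conquer recursion: split the index range at its midpoint, test only the junction pair, and concatenate the recursive halves.
import Mathlib
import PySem

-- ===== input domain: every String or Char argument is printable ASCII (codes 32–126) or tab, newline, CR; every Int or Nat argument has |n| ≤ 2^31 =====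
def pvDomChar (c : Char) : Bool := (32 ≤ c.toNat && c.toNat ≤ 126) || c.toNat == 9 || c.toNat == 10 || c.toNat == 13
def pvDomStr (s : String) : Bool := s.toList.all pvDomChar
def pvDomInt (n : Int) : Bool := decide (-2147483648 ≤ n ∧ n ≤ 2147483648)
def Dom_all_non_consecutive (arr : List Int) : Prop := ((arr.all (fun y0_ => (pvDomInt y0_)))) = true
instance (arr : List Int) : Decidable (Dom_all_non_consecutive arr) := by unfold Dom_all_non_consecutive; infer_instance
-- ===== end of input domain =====

-- B replaces A's single pass with a running `expected` accumulator by a divide-and-conquer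
-- recursion on the index range (test only the junction pair at the midpoint); alternative
-- decomposition, same O(n) cost; return values proved equal on all inputs.

-- ===== PORT A =====
-- loop body of A's for-loop: state = (ret, expected)
def pvStepA (st : List (List (String × Int)) × Int) (p : Int × Int) :
    List (List (String × Int)) × Int :=
  let st' := if st.2 ≠ p.2 then (st.1 ++ [[("i", p.1), ("n", p.2)]], p.2) else st
  (st'.1, st'.2 + 1)

def all_non_consecutive (arr : List Int) : List (List (String × Int)) :=
  if arr.length ≤ 1 then []
  else
    -- arr[0] is safe here (len(arr) ≥ 2), ported as pyGetD with an unused default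
    ((PySem.List.enumerate arr 0).foldl pvStepA ([], PySem.List.pyGetD arr 0 0)).1

-- ===== PORT B =====
-- Source B's `junction` value: arr[mid] / arr[mid-1] are in range whenever 0 < mid < len(arr),
-- ported as pyGetD with an unused default
def pvJunction (arr : List Int) (mid : Int) : List (List (String × Int)) :=
  if PySem.List.pyGetD arr mid 0 ≠ PySem.List.pyGetD arr (mid - 1) 0 + 1
  then [[("i", mid), ("n", PySem.List.pyGetD arr mid 0)]] else []

-- Source B's inner `solve(lo, hi)`
def pvSolve (arr : List Int) (lo hi : Int) : List (List (String × Int)) :=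
  if hle : hi - lo ≤ 1 then []
  else
    let mid := PySem.Int.floordiv (lo + hi) 2
    pvSolve arr lo mid ++ pvJunction arr mid ++ pvSolve arr mid hi
termination_by (hi - lo).toNat
decreasing_by
  all_goals
    have h2 : PySem.Int.floordiv (lo + hi) 2 = (lo + hi) / 2 :=
      PySem.Int.floordiv_eq_ediv_of_pos (by omega)
    simp only [h2] at *
    omega

def all_non_consecutive_alt (arr : List Int) : List (List (String × Int)) :=
  if arr.length ≤ 1 then [] else pvSolve arr 0 arr.length

-- ===== PRECONDITION & SPEC =====
def Spec_all_non_consecutive (arr : List Int) (out : List (List (String × Int))) : Prop := out = all_non_consecutive_alt arr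
instance (arr : List Int) (out : List (List (String × Int))) : Decidable (Spec_all_non_consecutive arr out) := by unfold Spec_all_non_consecutive; infer_instance

-- ===== CLAIM (what is proved, stated in full; the proofs are below) =====
def Claim_equal_all_non_consecutive : Prop := ∀ (arr : List Int), Dom_all_non_consecutive arr → Spec_all_non_consecutive arr (all_non_consecutive arr)

-- ===== LEMMAS AND PROOFS =====

-- common normal form: the break entries with index in (lo, hi), read off by index
def pvSpan (arr : List Int) (lo hi : Int) : List (List (String × Int)) :=
  (PySem.List.pyRange (lo + 1) hi 1).flatMap (pvJunction arr)

lemma pvSolve_eq_span (arr : List Int) : ∀ (lo hi : Int),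
    pvSolve arr lo hi = pvSpan arr lo hi := by
  intro lo hi
  induction hn : (hi - lo).toNat using Nat.strong_induction_on generalizing lo hi with
  | _ n ih =>
    rw [pvSolve]
    by_cases hle : hi - lo ≤ 1
    · rw [dif_pos hle]
      unfold pvSpan
      rw [PySem.List.pyRange_one_eq_nil (by omega)]
      simp
    · rw [dif_neg hle]
      show pvSolve arr lo (PySem.Int.floordiv (lo + hi) 2) ++
          pvJunction arr (PySem.Int.floordiv (lo + hi) 2) ++
          pvSolve arr (PySem.Int.floordiv (lo + hi) 2) hi = pvSpan arr lo hi
      have h2 : PySem.Int.floordiv (lo + hi) 2 = (lo + hi) / 2 :=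
        PySem.Int.floordiv_eq_ediv_of_pos (by omega)
      set mid := PySem.Int.floordiv (lo + hi) 2 with hmid
      have hlo : lo < mid := by omega
      have hhi : mid < hi := by omega
      rw [ih (mid - lo).toNat (by omega) lo mid rfl,
          ih (hi - mid).toNat (by omega) mid hi rfl]
      unfold pvSpan
      rw [PySem.List.pyRange_one_append (lo + 1) mid hi (by omega) (by omega),
          PySem.List.pyRange_one_cons (a := mid) (b := hi) (by omega)]
      simp

-- the loop body of A, with `expected` known to be prev + 1, is the junction test —
-- provided pyGetD reads of arr agree with the suffix prev :: xs starting at index k - 1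
lemma pv_loop (arr : List Int) : ∀ (xs : List Int) (prev k : Int)
    (acc : List (List (String × Int)))
    (hread : ∀ j : Nat, (j : Int) < (xs.length : Int) + 1 →
      PySem.List.pyGetD arr (k - 1 + (j : Int)) 0 = (prev :: xs).getD j 0),
    ((PySem.List.enumerate xs k).foldl pvStepA (acc, prev + 1)).1
      = acc ++ pvSpan arr (k - 1) (k + xs.length) := by
  intro xs
  induction xs with
  | nil =>
    intro prev k acc hread
    simp only [PySem.List.enumerate_nil, List.foldl_nil, List.length_nil,
      Int.natCast_zero, add_zero]
    unfold pvSpan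
    rw [PySem.List.pyRange_one_eq_nil (by omega)]
    simp
  | cons y ys ih =>
    intro prev k acc hread
    have hk : PySem.List.pyGetD arr k 0 = y := by
      have h1lt : (((1 : Nat) : Int)) < (((y :: ys).length : Nat) : Int) + 1 := by
        push_cast [List.length_cons]; omega
      have := hread 1 h1lt
      simpa using this
    have hk1 : PySem.List.pyGetD arr (k - 1) 0 = prev := by
      have h0lt : (((0 : Nat) : Int)) < (((y :: ys).length : Nat) : Int) + 1 := by
        push_cast [List.length_cons]; omega
      have := hread 0 h0lt
      simpa using this
    have hb : k + (((y :: ys).length : Nat) : Int) = (k + 1) + ((ys.length : Nat) : Int) := by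
      push_cast [List.length_cons]; ring
    have hspan : pvSpan arr (k - 1) (k + ((y :: ys).length : Int))
        = pvJunction arr k ++ pvSpan arr ((k + 1) - 1) ((k + 1) + (ys.length : Int)) := by
      unfold pvSpan
      rw [hb, show (k - 1 + 1) = k by omega, show ((k + 1) - 1 + 1) = k + 1 by omega,
          PySem.List.pyRange_one_cons (a := k) (b := (k + 1) + (ys.length : Int))
            (by have := Int.natCast_nonneg ys.length; omega)]
      simp
    rw [hspan, PySem.List.enumerate_cons, List.foldl_cons]
    have hread' : ∀ j : Nat, (j : Int) < (ys.length : Int) + 1 →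
        PySem.List.pyGetD arr (k + 1 - 1 + (j : Int)) 0 = (y :: ys).getD j 0 := by
      intro j hj
      have := hread (j + 1) (by push_cast [List.length_cons] at hj ⊢; omega)
      rw [show (k - 1 + (((j : Nat) + 1 : Nat) : Int)) = (k + 1 - 1 + (j : Int)) by push_cast; omega] at this
      simpa using this
    by_cases h : y = prev + 1
    · have hstep : pvStepA (acc, prev + 1) (k, y) = (acc, y + 1) := by
        simp [pvStepA, h]
      rw [hstep, ih y (k + 1) acc hread']
      have hj : pvJunction arr k = [] := by
        simp [pvJunction, hk, hk1, h]
      rw [hj]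
      simp
    · have hstep : pvStepA (acc, prev + 1) (k, y)
          = (acc ++ [[("i", k), ("n", y)]], y + 1) := by
        simp only [pvStepA, ne_eq, ite_not]
        rw [if_neg (fun h' => h (h'.symm))]
      rw [hstep, ih y (k + 1) (acc ++ [[("i", k), ("n", y)]]) hread']
      have hj : pvJunction arr k = [[("i", k), ("n", y)]] := by
        simp only [pvJunction, hk, hk1]
        rw [if_pos (fun h' => h h')]
      rw [hj]
      simp

-- ===== VERDICT (by name: the statement is the Claim_ definition above) =====
theorem all_non_consecutive_spec : Claim_equal_all_non_consecutive := by
  intro arr _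
  unfold Spec_all_non_consecutive all_non_consecutive all_non_consecutive_alt
  match arr with
  | [] => simp
  | [x] => simp
  | x0 :: x1 :: rest =>
    have hlen : ¬ (x0 :: x1 :: rest).length ≤ 1 := by simp
    rw [if_neg hlen, if_neg hlen]
    have h0 : PySem.List.pyGetD (x0 :: x1 :: rest) 0 0 = x0 := by
      simp
    rw [h0, PySem.List.enumerate_cons, List.foldl_cons]
    have hstep : pvStepA ([], x0) ((0 : Int), x0) = ([], x0 + 1) := by
      simp [pvStepA]
    rw [hstep]
    have hread : ∀ j : Nat, (j : Int) < ((x1 :: rest).length : Int) + 1 →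
        PySem.List.pyGetD (x0 :: x1 :: rest) ((0 : Int) + 1 - 1 + (j : Int)) 0
          = (x0 :: x1 :: rest).getD j 0 := by
      intro j hj
      rw [show ((0 : Int) + 1 - 1 + (j : Int)) = (j : Int) by omega]
      simp [PySem.List.pyGetD_natCast]
    rw [pv_loop (x0 :: x1 :: rest) (x1 :: rest) x0 (0 + 1) [] hread,
        pvSolve_eq_span]
    simp only [List.nil_append]
    rw [show ((0 : Int) + 1 - 1) = 0 from by norm_num,
        show ((0 : Int) + 1) + (((x1 :: rest).length : Nat) : Int)
            = ((((x0 :: x1 :: rest).length : Nat)) : Int) from by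
          push_cast [List.length_cons]; ring]
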